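-- pv_equiv track=rewrite | github.com/Alvaropz/Python_problems_BinarySearch | 1. Easy/smallest_number_with_no_adjacent_duplicates/smallest_number_with_no_adjacent_duplicates.py | smallest_number_with_no_adjacent_duplicates
-- ===== SOURCE A (Python) =====
-- def smallest_number_with_no_adjacent_duplicates(s):
--     n_string = ''
--     el_list = []
--     if len(s) == 1 and s[0] == "?":
--         return "1"
--     for element in s:
--         if element != "?":
--             el_list.append(int(element))
--         else:
--             el_list.append("?")
--     for index, element in enumerate(el_list):
--         if element == "?":
--             el_list[index] = 1
--             if index != 0 and index != len(el_list)-1: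
--                 if el_list[index-1] == el_list[index] or el_list[index] == el_list[index+1]:
--                     el_list[index] += 1
--                 if el_list[index-1] == el_list[index] or el_list[index] == el_list[index+1]:
--                     el_list[index] += 1
--             if index == 0 and el_list[index+1] == 1:
--                 el_list[index] += 1
--             if index == len(el_list)-1 and el_list[index-1] == 1:
--                 el_list[index] += 1
--         n_string += str(el_list[index])
--     return n_string
-- ===== SOURCE B (Python) =====
-- def _alternate(low, m):
--     # m digits alternating low, 3-low, low, ...
--     return [] if m == 0 else [low] + _alternate(3 - low, m - 1)
--
-- def _fill_run(L, R, k):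
--     # digits for a run of k '?'s flanked by digit L on the left and digit R on
--     # the right (None at the string ends)
--     body = _alternate(2 if L == 1 else 1, k - 1)
--     prev = body[-1] if body else L
--     last = min(v for v in (1, 2, 3) if v != prev and v != R)
--     return body + [last]
--
-- def smallest_number_with_no_adjacent_duplicates(s):
--     n = len(s)
--     out = []
--     i = 0
--     while i < n:
--         if s[i] != '?':
--             out.append(str(int(s[i])))
--             i += 1
--         else:
--             j = i
--             while j < n and s[j] == '?':
--                 j += 1
--             L = int(s[i - 1]) if i > 0 else None
--             R = int(s[j]) if j < n else None
--             out.extend(str(d) for d in _fill_run(L, R, j - i))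
--             i = j
--     return ''.join(out)
-- ===== Notes on version B (the rewrite author's own statement) =====
-- stated objective: alternative
-- what changed: B replaces A's per-character greedy over a mutable mixed int/'?' list by a run decomposition: it scans for maximal runs of '?', and fills each run at once with a closed-form alternating 1/2 pattern plus a final digit avoiding the run's flanking digits.
import Mathlib
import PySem

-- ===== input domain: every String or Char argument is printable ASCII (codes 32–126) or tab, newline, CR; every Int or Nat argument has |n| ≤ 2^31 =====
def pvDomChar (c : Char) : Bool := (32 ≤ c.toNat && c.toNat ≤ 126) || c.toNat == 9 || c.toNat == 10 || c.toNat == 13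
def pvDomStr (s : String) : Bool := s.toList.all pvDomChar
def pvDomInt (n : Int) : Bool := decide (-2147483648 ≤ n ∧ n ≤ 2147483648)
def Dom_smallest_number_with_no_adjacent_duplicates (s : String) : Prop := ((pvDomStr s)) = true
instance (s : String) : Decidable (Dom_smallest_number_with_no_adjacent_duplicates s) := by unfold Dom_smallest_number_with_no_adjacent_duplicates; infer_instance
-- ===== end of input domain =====

-- B replaces A's per-character greedy over a mutable list by a run decomposition:
-- each maximal '?'-run is filled at once with a closed-form alternating pattern.
-- Same return value on every input where A returns (Pre_ excludes A's ValueErrors).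

-- ===== PORT A =====
-- int(element) for a one-char string (raises outside Pre_, where we default to 0)
def valA (c : Char) : Int := (PySem.Int.ofStr? (String.ofList [c])).getD 0

-- the in-place resolution A performs on el_list[index] when element == "?":
-- prev = el_list[index-1] after its update (none when index = 0),
-- nxt = el_list[index+1], still unresolved (none when index = last; some none when it is "?")
def qvalA (prev : Option Int) (nxt : Option (Option Int)) : Int :=
  let x0 : Int := 1
  let x1 : Int := if prev.isSome ∧ nxt.isSome ∧ (prev = some x0 ∨ nxt = some (some x0)) then x0 + 1 else x0
  let x2 : Int := if prev.isSome ∧ nxt.isSome ∧ (prev = some x1 ∨ nxt = some (some x1)) then x1 + 1 else x1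
  let x3 : Int := if prev = none ∧ nxt = some (some 1) then x2 + 1 else x2
  let x4 : Int := if nxt = none ∧ prev = some 1 then x3 + 1 else x3
  x4

-- A's second loop: walks el_list building n_string (some k = an int entry, none = "?")
def loopA (prev : Option Int) (l : List (Option Int)) : String :=
  match l with
  | [] => ""
  | cur :: tail =>
    let v : Int :=
      match cur with
      | some k => k
      | none => qvalA prev tail.head?
    PySem.Int.toStr v ++ loopA (some v) tail

def smallest_number_with_no_adjacent_duplicates (s : String) : String :=
  if s.toList.length = 1 ∧ s.toList.head? = some '?' then "1"
  else
    -- A's first loop: el_list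
    loopA none (s.toList.map (fun c => if c = '?' then none else some (valA c)))

-- ===== PORT B =====
def valB (c : Char) : Int := (PySem.Int.ofStr? (String.ofList [c])).getD 0

-- Source B _alternate: m digits alternating low, 3-low, low, …
def altFill (low : Int) (m : Nat) : List Int :=
  match m with
  | 0 => []
  | Nat.succ m' => low :: altFill (3 - low) m'

-- Source B's `min(v for v in (1,2,3) if v != prev and v != R)` (candidates ascending,
-- so the minimum is the first candidate avoiding both)
def pickMin (prev R : Option Int) : Int :=
  if prev ≠ some 1 ∧ R ≠ some 1 then 1
  else if prev ≠ some 2 ∧ R ≠ some 2 then 2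
  else 3

-- Source B _fill_run: digits for a run of k '?'s flanked by L and R (none at the ends)
def fillRun (L R : Option Int) (k : Nat) : List Int :=
  let body := altFill (if L = some 1 then (2 : Int) else 1) (k - 1)
  let prev : Option Int := match body.getLast? with | some x => some x | none => L
  body ++ [pickMin prev R]

-- Source B's while loop building `out`; L is the digit emitted for the previous
-- character (= int(s[i-1]) in Source B, since the char before a '?'-run is concrete)
def loopB (L : Option Int) (cs : List Char) : List String :=
  match cs with
  | [] => []
  | c :: rest =>
    if c ≠ '?' then PySem.Int.toStr (valB c) :: loopB (some (valB c)) rest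
    else
      let rest' := rest.dropWhile (· == '?')
      let R : Option Int := match rest'.head? with | some c2 => some (valB c2) | none => none
      (fillRun L R ((rest.takeWhile (· == '?')).length + 1)).map PySem.Int.toStr ++ loopB none rest'
termination_by cs.length
decreasing_by
  · simp
  · have := List.length_dropWhile_le (fun c => c == '?') rest
    simp; omega

def smallest_number_with_no_adjacent_duplicates_alt (s : String) : String :=
  PySem.Str.join "" (loopB none s.toList)

-- ===== PRECONDITION & SPEC =====
-- Pre_ excludes exactly the inputs on which A raises: any character other than '?'
-- or an ASCII digit makes int(element) raise ValueError (B raises there too).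
def Pre_smallest_number_with_no_adjacent_duplicates (s : String) : Prop :=
  (s.toList.all (fun c => c == '?' || ('0' ≤ c && c ≤ '9'))) = true
instance (s : String) : Decidable (Pre_smallest_number_with_no_adjacent_duplicates s) := by
  unfold Pre_smallest_number_with_no_adjacent_duplicates; infer_instance

def pvWitness_smallest_number_with_no_adjacent_duplicates : String := "1?"

def Spec_smallest_number_with_no_adjacent_duplicates (s : String) (out : String) : Prop := out = smallest_number_with_no_adjacent_duplicates_alt s
instance (s : String) (out : String) : Decidable (Spec_smallest_number_with_no_adjacent_duplicates s out) := by unfold Spec_smallest_number_with_no_adjacent_duplicates; infer_instance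

-- ===== CLAIM (what is proved, stated in full; the proofs are below) =====
def Claim_equal_smallest_number_with_no_adjacent_duplicates : Prop := ∀ (s : String), Dom_smallest_number_with_no_adjacent_duplicates s → Pre_smallest_number_with_no_adjacent_duplicates s → Spec_smallest_number_with_no_adjacent_duplicates s (smallest_number_with_no_adjacent_duplicates s)

-- ===== LEMMAS AND PROOFS =====

-- the first digit A assigns inside a run (next element still '?')
lemma qvalA_run (p : Option Int) : qvalA p (some none) = if p = some 1 then 2 else 1 := by
  rcases p with _ | a <;> simp only [qvalA] <;> split_ifs <;> simp_all

-- the digit A assigns when the run ends at the string end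
lemma qvalA_none (p : Option Int) : qvalA p none = pickMin p none := by
  rcases p with _ | a <;> simp only [qvalA, pickMin] <;> split_ifs <;> simp_all

-- the digit A assigns when the run is followed by a concrete digit r
lemma qvalA_digit (p : Option Int) (r : Int) : qvalA p (some (some r)) = pickMin p (some r) := by
  rcases p with _ | a <;> simp only [qvalA, pickMin] <;> split_ifs <;> simp_all

lemma altFill_ne_nil (low : Int) (m : Nat) : altFill low (m + 1) ≠ [] := by
  simp [altFill]

lemma getLast?_cons_ne {α : Type} (x : α) (t : List α) (ht : t ≠ []) :
    (x :: t).getLast? = t.getLast? := by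
  cases t with
  | nil => exact absurd rfl ht
  | cons a u => simp [List.getLast?_cons_cons]

lemma join_empty_nil : PySem.Str.join "" [] = "" := by
  apply String.toList_injective
  simp [PySem.Str.toList_join, PySem.Chars.join, List.intercalate]

-- peeling the first digit off a run fill
lemma altFill_succ (low : Int) (m : Nat) : altFill low (m + 1) = low :: altFill (3 - low) m := rfl

lemma fillRun_succ (L R : Option Int) (m : Nat) :
    fillRun L R (m + 2) =
      (if L = some 1 then (2 : Int) else 1) ::
        fillRun (some (if L = some 1 then (2 : Int) else 1)) R (m + 1) := by
  by_cases hL : L = some 1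
  · subst hL
    simp only [fillRun, reduceIte]
    norm_num
    rw [show altFill 2 (m + 1) = 2 :: altFill 1 m from by rw [altFill_succ]; norm_num]
    cases m with
    | zero => simp [altFill]
    | succ m' =>
      rw [getLast?_cons_ne _ (altFill 1 (m' + 1)) (altFill_ne_nil _ _)]
      simp
      rcases hx : (altFill 1 (m' + 1)).getLast? with _ | x
      · exact absurd (List.getLast?_eq_none_iff.mp hx) (altFill_ne_nil _ _)
      · simp
  · simp only [fillRun, if_neg hL, reduceIte]
    norm_num
    rw [show altFill 1 (m + 1) = 1 :: altFill 2 m from by rw [altFill_succ]; norm_num]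
    cases m with
    | zero => simp [altFill]
    | succ m' =>
      rw [getLast?_cons_ne _ (altFill 2 (m' + 1)) (altFill_ne_nil _ _)]
      simp
      rcases hx : (altFill 2 (m' + 1)).getLast? with _ | x
      · exact absurd (List.getLast?_eq_none_iff.mp hx) (altFill_ne_nil _ _)
      · simp

-- join with the empty separator concatenates
lemma join_empty_cons (a : String) (l : List String) :
    PySem.Str.join "" (a :: l) = a ++ PySem.Str.join "" l := by
  apply String.toList_injective
  simp [PySem.Str.toList_join, PySem.Chars.join, List.intercalate]
  cases l <;> simp

lemma join_empty_append (l1 l2 : List String) :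
    PySem.Str.join "" (l1 ++ l2) = PySem.Str.join "" l1 ++ PySem.Str.join "" l2 := by
  induction l1 with
  | nil =>
    apply String.toList_injective
    simp [PySem.Str.toList_join, PySem.Chars.join, List.intercalate]
  | cons a t ih =>
    rw [List.cons_append, join_empty_cons, join_empty_cons, ih, String.append_assoc]

-- loopA's prev argument is unread when the head is a concrete entry
lemma loopA_prev_irrel (tail : List (Option Int)) (h : tail.head? ≠ some none)
    (q q' : Option Int) : loopA q tail = loopA q' tail := by
  cases tail with
  | nil => rfl
  | cons x t =>
    cases x with
    | none => simp at h
    | some d => simp [loopA]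

-- the right constraint B reads off the list after the run
def rOf (tail : List (Option Int)) : Option Int :=
  match tail.head? with
  | some (some d) => some d
  | _ => none

-- A over a maximal '?'-run produces exactly B's closed-form fill
lemma runEq (m : Nat) : ∀ (p : Option Int) (tail : List (Option Int)),
    tail.head? ≠ some none →
    loopA p (List.replicate (m + 1) none ++ tail) =
      PySem.Str.join "" ((fillRun p (rOf tail) (m + 1)).map PySem.Int.toStr) ++ loopA none tail := by
  induction m with
  | zero =>
    intro p tail htail
    have hv : qvalA p tail.head? = pickMin p (rOf tail) := by
      cases tail with
      | nil => exact qvalA_none p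
      | cons x t =>
        cases x with
        | none => simp at htail
        | some r => exact qvalA_digit p r
    simp only [List.replicate, List.cons_append, List.nil_append, loopA, hv]
    rw [loopA_prev_irrel tail htail (some (pickMin p (rOf tail))) none]
    have : fillRun p (rOf tail) 1 = [pickMin p (rOf tail)] := by simp [fillRun, altFill]
    rw [this]
    rw [show ([pickMin p (rOf tail)].map PySem.Int.toStr)
        = [PySem.Int.toStr (pickMin p (rOf tail))] from rfl]
    rw [join_empty_cons]
    apply String.toList_injective
    simp [PySem.Str.toList_join, PySem.Chars.join, List.intercalate]
  | succ m' ih =>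
    intro p tail htail
    have hhead : (List.replicate (m' + 1) (none : Option Int) ++ tail).head? = some none := by
      simp [List.replicate]
    have step : loopA p (List.replicate (m' + 2) none ++ tail)
        = PySem.Int.toStr (if p = some 1 then (2 : Int) else 1)
          ++ loopA (some (if p = some 1 then (2 : Int) else 1))
               (List.replicate (m' + 1) none ++ tail) := by
      rw [show (List.replicate (m' + 2) (none : Option Int) ++ tail)
          = none :: (List.replicate (m' + 1) none ++ tail) by simp [List.replicate]]
      simp only [loopA, hhead, qvalA_run]
    rw [step, ih _ tail htail, fillRun_succ, List.map_cons, join_empty_cons,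
      String.append_assoc]

-- a maximal '?'-run maps to a block of `none`s
lemma map_takeWhile_replicate (rest : List Char) :
    (rest.takeWhile (· == '?')).map (fun c => if c = '?' then none else some (valA c))
      = List.replicate (rest.takeWhile (· == '?')).length none := by
  have hmem : ∀ x ∈ (rest.takeWhile (· == '?')).map
      (fun c => if c = '?' then none else some (valA c)), x = (none : Option Int) := by
    intro x hx
    rw [List.mem_map] at hx
    obtain ⟨c, hc, hcx⟩ := hx
    have := List.mem_takeWhile_imp hc
    simp at this
    simp [← hcx, this]
  have := List.eq_replicate_of_mem hmem
  simpa using this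

-- the char after a '?'-run is not '?'
lemma head_dropWhile_ne (rest : List Char) (c2 : Char)
    (h : (rest.dropWhile (· == '?')).head? = some c2) : c2 ≠ '?' := by
  intro hc
  subst hc
  induction rest with
  | nil => simp at h
  | cons a t ih =>
    by_cases ha : (a == '?') = true
    · rw [List.dropWhile_cons, if_pos ha] at h; exact ih h
    · rw [List.dropWhile_cons, if_neg ha] at h; simp at h; simp [h] at ha

-- A's walk equals B's run-by-run construction
lemma loopAB : ∀ (n : Nat) (cs : List Char) (p : Option Int), cs.length ≤ n →
    loopA p (cs.map (fun c => if c = '?' then none else some (valA c)))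
      = PySem.Str.join "" (loopB p cs) := by
  intro n
  induction n with
  | zero =>
    intro cs p h
    rw [List.length_eq_zero_iff.mp (Nat.le_zero.mp h)]
    rw [show loopB p [] = [] from by rw [loopB], join_empty_nil]
    rfl
  | succ n' ih =>
    intro cs p h
    cases cs with
    | nil =>
      rw [show loopB p [] = [] from by rw [loopB], join_empty_nil]
      rfl
    | cons c rest =>
      by_cases hc : c = '?'
      · subst hc
        have hdec : rest.map (fun c => if c = '?' then none else some (valA c))
            = List.replicate (rest.takeWhile (· == '?')).length none
              ++ (rest.dropWhile (· == '?')).map (fun c => if c = '?' then none else some (valA c)) := by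
          conv_lhs => rw [← List.takeWhile_append_dropWhile (p := (· == '?')) (l := rest)]
          rw [List.map_append, map_takeWhile_replicate]
        rw [show ('?' :: rest).map (fun c => if c = '?' then none else some (valA c))
            = List.replicate ((rest.takeWhile (· == '?')).length + 1) none
              ++ (rest.dropWhile (· == '?')).map (fun c => if c = '?' then none else some (valA c)) by
          rw [List.map_cons, List.replicate_succ, List.cons_append, hdec]; norm_num]
        have htail : ((rest.dropWhile (· == '?')).map (fun c => if c = '?' then none else some (valA c))).head? ≠ some none := by
          cases hd : (rest.dropWhile (· == '?')) with
          | nil => simp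
          | cons c2 t =>
            have := head_dropWhile_ne rest c2 (by rw [hd]; rfl)
            simp [this]
        rw [runEq _ p _ htail]
        have hR : rOf ((rest.dropWhile (· == '?')).map (fun c => if c = '?' then none else some (valA c)))
            = (match (rest.dropWhile (· == '?')).head? with
               | some c2 => some (valB c2) | none => none) := by
          cases hd : (rest.dropWhile (· == '?')) with
          | nil => rfl
          | cons c2 t =>
            have := head_dropWhile_ne rest c2 (by rw [hd]; rfl)
            simp [rOf, this, valA, valB]
        have hlen : (rest.dropWhile (· == '?')).length ≤ n' := by
          have := List.length_dropWhile_le (fun c => c == '?') rest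
          simp at h; omega
        rw [ih _ none hlen, hR]
        rw [show loopB p ('?' :: rest)
            = (fillRun p (match (rest.dropWhile (· == '?')).head? with
               | some c2 => some (valB c2) | none => none)
               ((rest.takeWhile (· == '?')).length + 1)).map PySem.Int.toStr
              ++ loopB none (rest.dropWhile (· == '?')) by
          rw [loopB]; simp]
        rw [join_empty_append]
      · rw [show loopB p (c :: rest)
            = PySem.Int.toStr (valB c) :: loopB (some (valB c)) rest by rw [loopB]; simp [hc]]
        rw [join_empty_cons]
        rw [show (c :: rest).map (fun c => if c = '?' then none else some (valA c))
            = some (valA c) :: rest.map (fun c => if c = '?' then none else some (valA c)) by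
          rw [List.map_cons, if_neg hc]]
        rw [show loopA p (some (valA c) :: rest.map (fun c => if c = '?' then none else some (valA c)))
            = PySem.Int.toStr (valA c)
              ++ loopA (some (valA c)) (rest.map (fun c => if c = '?' then none else some (valA c))) from rfl]
        have hlen : rest.length ≤ n' := by simp at h; omega
        rw [ih rest (some (valA c)) hlen]
        rfl

-- ===== VERDICT (by name: the statement is the Claim_ definition above) =====
theorem smallest_number_with_no_adjacent_duplicates_spec : Claim_equal_smallest_number_with_no_adjacent_duplicates := by
  intro s _ _
  unfold Spec_smallest_number_with_no_adjacent_duplicates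
    smallest_number_with_no_adjacent_duplicates
    smallest_number_with_no_adjacent_duplicates_alt
  split_ifs with h
  · obtain ⟨h1, h2⟩ := h
    have : s.toList = ['?'] := by
      cases hl : s.toList with
      | nil => simp [hl] at h1
      | cons a t =>
        rw [hl] at h1 h2
        cases t with
        | nil => simp at h2; simp [h2]
        | cons b u => simp at h1
    rw [this, show loopB none ['?'] = [PySem.Int.toStr 1] from by
      rw [loopB]; simp [fillRun, altFill, pickMin]; rw [loopB]]
    rw [join_empty_cons, join_empty_nil]
    decide
  · exact loopAB s.toList.length s.toList none le_rfl
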